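-- pv_equiv track=rewrite | github.com/Wellan76/code-de-vigen-re | Projet_info_n1.py | IC10
-- ===== SOURCE A (Python) =====
-- def IC10(a:int):
--     str = ""
--     sous_chaine = []
--     for j in range(0,10):
--         for i in range(j,len(a),10):
--             str = str + a[i]
--         sous_chaine.append(str)
--         str = ""
--     return sous_chaine
-- ===== SOURCE B (Python) =====
-- def IC10(a):
--     cols = [""] * 10
--     for i, ch in enumerate(a):
--         cols[i % 10] += ch
--     return cols
-- ===== Notes on version B (the rewrite author's own statement) =====
-- stated objective: simpler
-- what changed: Replaces A's ten strided passes (outer loop over column index, inner loop stepping by 10) with a single enumerate pass that routes each character to bucket i % 10.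
import Mathlib
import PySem

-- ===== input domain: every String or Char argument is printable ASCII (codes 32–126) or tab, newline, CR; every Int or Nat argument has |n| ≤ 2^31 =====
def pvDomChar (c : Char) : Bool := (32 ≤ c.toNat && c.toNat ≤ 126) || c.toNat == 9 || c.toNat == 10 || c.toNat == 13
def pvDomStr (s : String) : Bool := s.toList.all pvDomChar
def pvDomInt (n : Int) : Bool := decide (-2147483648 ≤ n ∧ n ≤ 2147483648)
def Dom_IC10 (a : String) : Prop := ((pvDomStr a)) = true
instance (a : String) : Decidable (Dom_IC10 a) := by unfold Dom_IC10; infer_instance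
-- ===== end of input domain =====

-- B builds the 10 columns in one enumerate pass (routing each character to bucket i % 10)
-- instead of A's ten strided passes; same output, different traversal of the string.

-- ===== PORT A =====
-- A: for j in range(0,10): for i in range(j, len(a), 10): str = str + a[i]; append str
-- (Python strings are handled as List Char and rebuilt with String.ofList; indexing a[i] is
-- PySem.List.pyGetD on the char list — exact, all indices produced by range are in range)
def IC10 (a : String) : List String :=
  ((PySem.List.pyRange 0 10 1).foldl (fun sous j =>
      sous ++ [(PySem.List.pyRange j (PySem.List.len a.toList) 10).foldl
                 (fun str i => str ++ [PySem.List.pyGetD a.toList i ' ']) ([] : List Char)])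
    ([] : List (List Char))).map String.ofList

-- ===== PORT B =====
-- B: cols = [''] * 10; for i, ch in enumerate(a): cols[i % 10] += ch; return cols
def IC10_alt (a : String) : List String :=
  (a.toList.zipIdx.foldl
      (fun cols p =>
        cols.set (p.2 % 10) ((cols.getD (p.2 % 10) ([] : List Char)) ++ [p.1]))
      (List.replicate 10 ([] : List Char))).map String.ofList

-- ===== PRECONDITION & SPEC =====
def Spec_IC10 (a : String) (out : List String) : Prop := out = IC10_alt a
instance (a : String) (out : List String) : Decidable (Spec_IC10 a out) := by unfold Spec_IC10; infer_instance

-- ===== CLAIM (what is proved, stated in full; the proofs are below) =====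
def Claim_equal_IC10 : Prop := ∀ (a : String), Dom_IC10 a → Spec_IC10 a (IC10 a)

-- ===== LEMMAS AND PROOFS =====

-- canonical column j of cs: the characters at indices ≡ j (mod 10), in increasing index order
def pvCol (cs : List Char) (j : Nat) : List Char :=
  ((List.range cs.length).filter (fun i => i % 10 == j)).map (fun i => cs.getD i ' ')

theorem pvCol_append_singleton (cs : List Char) (c : Char) (j : Nat) :
    pvCol (cs ++ [c]) j = pvCol cs j ++ (if cs.length % 10 == j then [c] else []) := by
  unfold pvCol
  rw [List.length_append, List.length_singleton, List.range_succ, List.filter_append, List.map_append]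
  congr 1
  · apply List.map_congr_left
    intro i hi
    have : i < cs.length := List.mem_range.mp (List.mem_filter.mp hi).1
    simp [List.getD, List.getElem?_append_left this]
  · by_cases h : cs.length % 10 == j <;> simp [h, List.getD]

-- A's strided index list for column j is exactly the indices ≡ j (mod 10) below n
theorem pyRange_ten_eq_filter (j n : Nat) (hj : j < 10) :
    PySem.List.pyRange (j : Int) (n : Int) 10 =
      ((List.range n).filter (fun i => i % 10 == j)).map (Nat.cast) := by
  apply List.Perm.eq_of_pairwise (le := (· < ·))
  · intro a b _ _ h1 h2; omega
  · rw [PySem.List.pyRange_of_pos _ _ (by norm_num), List.pairwise_map]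
    exact List.Pairwise.imp (by intro h; omega) List.pairwise_lt_range
  · rw [List.pairwise_map]
    exact List.Pairwise.imp (fun h => by exact_mod_cast h) ((List.pairwise_lt_range).filter _)
  · rw [List.perm_ext_iff_of_nodup]
    · intro x
      rw [PySem.List.mem_pyRange_iff_of_pos (by norm_num)]
      simp only [List.mem_map, List.mem_filter, List.mem_range, beq_iff_eq]
      constructor
      · rintro ⟨h1, h2, h3⟩
        exact ⟨x.toNat, ⟨by omega, by omega⟩, by omega⟩
      · rintro ⟨i, ⟨hi, hm⟩, rfl⟩
        refine ⟨by omega, by omega, by omega⟩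
    · rw [PySem.List.pyRange_of_pos _ _ (by norm_num)]
      exact List.Nodup.map (fun a b h => by omega) List.nodup_range
    · exact List.Nodup.map (fun a b h => by exact_mod_cast h) ((List.nodup_range).filter _)

-- A's inner loop for column j computes the canonical column
theorem colA_eq (cs : List Char) (j : Nat) (hj : j < 10) :
    (PySem.List.pyRange (j : Int) (PySem.List.len cs) 10).foldl
        (fun str i => str ++ [PySem.List.pyGetD cs i ' ']) ([] : List Char) = pvCol cs j := by
  rw [PySem.List.len_eq, pyRange_ten_eq_filter j cs.length hj,
      PySem.List.foldl_append_singleton_eq_map, List.nil_append, List.map_map]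
  unfold pvCol
  apply List.map_congr_left
  intro i _
  simp [PySem.List.pyGetD_natCast]

-- B's single pass maintains all ten canonical columns at once
theorem B_inv (cs : List Char) :
    cs.zipIdx.foldl
        (fun cols p =>
          cols.set (p.2 % 10) ((cols.getD (p.2 % 10) ([] : List Char)) ++ [p.1]))
        (List.replicate 10 ([] : List Char))
      = (List.range 10).map (fun j => pvCol cs j) := by
  induction cs using List.reverseRecOn with
  | nil => decide
  | append_singleton xs c ih =>
    rw [List.zipIdx_append, List.foldl_append, ih]
    simp only [List.zipIdx, List.foldl_cons, List.foldl_nil, Nat.zero_add]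
    apply List.ext_getElem
    · simp
    intro k hk1 hk2
    have hk : k < 10 := by simpa using hk2
    have hm : xs.length % 10 < 10 := by omega
    have hget : (List.map (fun j => pvCol xs j) (List.range 10)).getD (xs.length % 10) []
        = pvCol xs (xs.length % 10) := by
      rw [List.getD_eq_getElem _ _ (by simpa using hm), List.getElem_map, List.getElem_range]
    rw [List.getElem_set]
    conv_rhs => rw [List.getElem_map, List.getElem_range, pvCol_append_singleton]
    by_cases h : xs.length % 10 = k
    · rw [if_pos h, hget, h]; simp
    · rw [if_neg h, List.getElem_map, List.getElem_range]
      simp [h]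

theorem A_eq_cols (a : String) :
    IC10 a = ((List.range 10).map (fun j => pvCol a.toList j)).map String.ofList := by
  unfold IC10
  rw [PySem.List.foldl_append_singleton_eq_map, List.nil_append]
  have h10 : PySem.List.pyRange 0 10 1 = (List.range 10).map (Nat.cast) := by decide
  rw [h10, List.map_map, List.map_map, List.map_map]
  apply List.map_congr_left
  intro j hj
  simp only [Function.comp]
  rw [colA_eq a.toList j (List.mem_range.mp hj)]

-- ===== VERDICT (by name: the statement is the Claim_ definition above) =====
theorem IC10_spec : Claim_equal_IC10 := by
  intro a _
  unfold Spec_IC10 IC10_alt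
  rw [A_eq_cols, B_inv]
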